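-- pv_equiv track=rewrite | github.com/camcarre/revisioncam | app/planning_service.py | _compute_offsets
-- ===== SOURCE A (Python) =====
-- from typing import Dict, List, Optional
--
-- OFFSETS_TEMPLATE = [1, 3, 7, 14, 21, 30, 45, 60, 75, 90, 105, 120, 135]
--
-- def _compute_offsets(nb_revisions: int, total_days: int) -> List[int]:
--     if total_days <= 0:
--         return [0] * nb_revisions
--
--     offsets: List[int] = []
--     template_idx = 0
--     last_offset = 0
--     max_offset = max(1, total_days - 1)
--
--     while len(offsets) < nb_revisions:
--         if template_idx < len(OFFSETS_TEMPLATE):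
--             candidate = OFFSETS_TEMPLATE[template_idx]
--             template_idx += 1
--         else:
--             candidate = last_offset + 15
--
--         candidate = min(candidate, max_offset)
--         if candidate <= last_offset:
--             candidate = min(max_offset, last_offset + 1)
--         offsets.append(candidate)
--         last_offset = candidate
--
--     return offsets
-- ===== SOURCE B (Python) =====
-- OFFSETS_TEMPLATE = [1, 3, 7, 14, 21, 30, 45, 60, 75, 90, 105, 120, 135]
--
-- def _compute_offsets(nb_revisions, total_days):
--     if total_days <= 0:
--         return [0] * nb_revisions
--     m = max(1, total_days - 1)
--     k = len(OFFSETS_TEMPLATE)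
--     return [min(OFFSETS_TEMPLATE[i] if i < k
--                 else OFFSETS_TEMPLATE[-1] + 15 * (i - k + 1), m)
--             for i in range(nb_revisions)]
-- ===== Notes on version B (the rewrite author's own statement) =====
-- stated objective: simpler
-- what changed: Replaced the stateful while loop threading template_idx/last_offset with the corrective 'candidate <= last_offset' repair branch by a closed-form per-index comprehension: offset i is min(raw_i, max_offset) where raw_i continues the template arithmetically (135 + 15*(i-12)); the repair branch is proved to only ever reproduce the cap. (constant-factor speedup: one arithmetic expression per index instead of per-iteration state updates and repair-branch tests)
import Mathlib
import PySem

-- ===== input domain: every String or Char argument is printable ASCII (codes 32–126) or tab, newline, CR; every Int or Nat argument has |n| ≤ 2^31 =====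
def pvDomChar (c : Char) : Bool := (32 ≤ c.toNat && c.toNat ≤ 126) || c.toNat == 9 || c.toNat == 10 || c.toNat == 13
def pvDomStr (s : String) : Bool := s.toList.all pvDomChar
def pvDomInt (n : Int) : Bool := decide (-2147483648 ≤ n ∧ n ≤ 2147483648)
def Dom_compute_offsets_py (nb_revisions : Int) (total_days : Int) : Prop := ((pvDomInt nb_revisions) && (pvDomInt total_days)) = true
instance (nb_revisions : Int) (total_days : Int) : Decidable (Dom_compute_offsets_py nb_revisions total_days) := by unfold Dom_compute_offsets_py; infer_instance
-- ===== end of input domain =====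

-- B replaces A's stateful while loop (template index + last_offset + monotonic-repair branch)
-- by a closed-form per-index comprehension min(raw_i, max_offset); objective: simpler.

-- ===== PORT A =====
def pvOffsetsTemplate : List Int := [1, 3, 7, 14, 21, 30, 45, 60, 75, 90, 105, 120, 135]

-- A's while loop appends exactly one element per iteration, so it runs (nb_revisions - len).toNat
-- = max(0, nb_revisions) more times; fuel = that count. State (template_idx, last_offset, max_offset)
-- is threaded exactly as in the Python.
def pvALoop : Nat → Nat → Int → Int → List Int
  | 0, _, _, _ => []
  | n + 1, template_idx, last_offset, max_offset =>
    let candidate0 : Int :=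
      if template_idx < pvOffsetsTemplate.length then pvOffsetsTemplate.getD template_idx 0
      else last_offset + 15
    let template_idx' : Nat :=
      if template_idx < pvOffsetsTemplate.length then template_idx + 1 else template_idx
    let candidate1 := min candidate0 max_offset
    let candidate2 := if candidate1 ≤ last_offset then min max_offset (last_offset + 1) else candidate1
    candidate2 :: pvALoop n template_idx' candidate2 max_offset

def compute_offsets_py (nb_revisions : Int) (total_days : Int) : List Int :=
  if total_days ≤ 0 then List.replicate nb_revisions.toNat 0  -- [0]*n: empty for n ≤ 0, exact
  else pvALoop nb_revisions.toNat 0 0 (max 1 (total_days - 1))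

-- ===== PORT B =====
def compute_offsets_py_alt (nb_revisions : Int) (total_days : Int) : List Int :=
  if total_days ≤ 0 then List.replicate nb_revisions.toNat 0  -- [0]*n
  else
    let m := max 1 (total_days - 1)
    let k : Int := pvOffsetsTemplate.length
    (PySem.List.pyRange 0 nb_revisions 1).map (fun i =>
      min (if i < k then pvOffsetsTemplate.getD i.toNat 0  -- i ≥ 0 in range, so plain indexing is exact
           else pvOffsetsTemplate.getD (pvOffsetsTemplate.length - 1) 0 + 15 * (i - k + 1)) m)

-- ===== PRECONDITION & SPEC =====
def Spec_compute_offsets_py (nb_revisions : Int) (total_days : Int) (out : List Int) : Prop := out = compute_offsets_py_alt nb_revisions total_days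
instance (nb_revisions : Int) (total_days : Int) (out : List Int) : Decidable (Spec_compute_offsets_py nb_revisions total_days out) := by unfold Spec_compute_offsets_py; infer_instance

-- ===== CLAIM (what is proved, stated in full; the proofs are below) =====
def Claim_equal_compute_offsets_py : Prop := ∀ (nb_revisions : Int) (total_days : Int), Dom_compute_offsets_py nb_revisions total_days → Spec_compute_offsets_py nb_revisions total_days (compute_offsets_py nb_revisions total_days)

-- ===== LEMMAS AND PROOFS =====

-- the uncapped offset sequence: template entries, then +15 steps
def pvRaw (j : Nat) : Int :=
  if j < 13 then pvOffsetsTemplate.getD j 0 else 135 + 15 * ((j : Int) - 12)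

-- value of last_offset before producing index k (uncapped)
def pvPrev (k : Nat) : Int := if k = 0 then 0 else pvRaw (k - 1)

theorem pvRaw_lt (j : Nat) : pvRaw j < pvRaw (j + 1) := by
  rcases lt_or_ge j 13 with h | h
  · interval_cases j <;> decide
  · unfold pvRaw
    rw [if_neg (by omega), if_neg (by omega)]
    push_cast; omega

theorem pvPrev_lt_raw (k : Nat) : pvPrev k < pvRaw k := by
  cases k with
  | zero => decide
  | succ j => simpa [pvPrev] using pvRaw_lt j

theorem pvRaw_succ_of_ge (k : Nat) (hk : 13 ≤ k) : pvRaw k = pvRaw (k - 1) + 15 := by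
  rcases eq_or_lt_of_le hk with h | h
  · subst h; decide
  · unfold pvRaw
    rw [if_neg (by omega), if_neg (by omega)]
    push_cast [Nat.cast_sub (by omega : 1 ≤ k)]; ring

theorem pvALoop_eq (m : Int) :
    ∀ (n k : Nat),
      pvALoop n (min k 13) (min (pvPrev k) m) m
        = (List.range n).map (fun j => min (pvRaw (k + j)) m) := by
  intro n
  induction n with
  | zero => intro k; simp [pvALoop]
  | succ n ih =>
    intro k
    have hraw := pvPrev_lt_raw k
    -- head value: the step produces min (pvRaw k) m, and template_idx' = min (k+1) 13
    have hc2 :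
        pvALoop (n + 1) (min k 13) (min (pvPrev k) m) m
          = min (pvRaw k) m :: pvALoop n (min (k + 1) 13) (min (pvRaw k) m) m := by
      show (let candidate0 : Int :=
              if min k 13 < pvOffsetsTemplate.length then pvOffsetsTemplate.getD (min k 13) 0
              else min (pvPrev k) m + 15
            let template_idx' : Nat :=
              if min k 13 < pvOffsetsTemplate.length then min k 13 + 1 else min k 13
            let candidate1 := min candidate0 m
            let candidate2 := if candidate1 ≤ min (pvPrev k) m then min m (min (pvPrev k) m + 1) else candidate1
            candidate2 :: pvALoop n template_idx' candidate2 m) = _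
      have hlen : pvOffsetsTemplate.length = 13 := by decide
      rcases lt_or_ge k 13 with hk | hk
      · -- template phase
        have h1 : min k 13 = k := by omega
        have h2 : min (k + 1) 13 = k + 1 := by omega
        have hc0 : pvOffsetsTemplate.getD k 0 = pvRaw k := by
          unfold pvRaw; rw [if_pos hk]
        simp only [h1, h2, hlen, if_pos hk, hc0]
        by_cases hpm : m ≤ pvPrev k
        · -- last_offset hit the cap: repair branch fires and reproduces m
          have hl : min (pvPrev k) m = m := by omega
          have hmin : min (pvRaw k) m = m := by omega
          rw [hl, if_pos (by omega : min (pvRaw k) m ≤ m),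
              show min m (m + 1) = m from by omega, hmin]
        · have hl : min (pvPrev k) m = pvPrev k := by omega
          rw [hl, if_neg (by omega : ¬ min (pvRaw k) m ≤ pvPrev k)]
      · -- extension phase: candidate = last_offset + 15
        have h1 : min k 13 = 13 := by omega
        have h2 : min (k + 1) 13 = 13 := by omega
        simp only [h1, h2, hlen, lt_irrefl, reduceIte]
        by_cases hpm : m ≤ pvPrev k
        · have hl : min (pvPrev k) m = m := by omega
          have hmin : min (pvRaw k) m = m := by omega
          rw [hl, if_pos (by omega : min (m + 15) m ≤ m),
              show min m (m + 1) = m from by omega, hmin]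
        · have hl : min (pvPrev k) m = pvPrev k := by omega
          have hc0 : pvPrev k + 15 = pvRaw k := by
            have := pvRaw_succ_of_ge k hk
            unfold pvPrev; rw [if_neg (by omega : ¬ k = 0)]; omega
          rw [hl, hc0, if_neg (by omega : ¬ min (pvRaw k) m ≤ pvPrev k)]
    have hprev : min (pvRaw k) m = min (pvPrev (k + 1)) m := by
      unfold pvPrev; rw [if_neg (by omega : ¬ k + 1 = 0)]; simp
    rw [hc2, hprev, ih (k + 1)]
    rw [List.range_succ_eq_map, List.map_cons, List.map_map]
    refine congrArg₂ List.cons ?_ ?_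
    · unfold pvPrev
      rw [if_neg (by omega : ¬ k + 1 = 0)]
      simp
    · apply List.map_congr_left
      intro a _
      show min (pvRaw (k + 1 + a)) m = min (pvRaw (k + (a + 1))) m
      congr 2
      omega

theorem pvB_point (m : Int) (j : Nat) :
    min (if (j : Int) < (pvOffsetsTemplate.length : Int)
         then pvOffsetsTemplate.getD ((j : Int)).toNat 0
         else pvOffsetsTemplate.getD (pvOffsetsTemplate.length - 1) 0
              + 15 * ((j : Int) - (pvOffsetsTemplate.length : Int) + 1)) m
      = min (pvRaw j) m := by
  have hlen : pvOffsetsTemplate.length = 13 := by decide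
  rcases lt_or_ge j 13 with h | h
  · rw [if_pos (by rw [hlen]; exact_mod_cast h)]
    unfold pvRaw
    rw [if_pos h, Int.toNat_natCast]
  · rw [if_neg (by rw [hlen]; push_cast; omega)]
    unfold pvRaw
    rw [if_neg (by omega), hlen,
        show pvOffsetsTemplate.getD (13 - 1) 0 = (135 : Int) from by decide]
    congr 1
    push_cast
    ring

theorem compute_offsets_py_spec : Claim_equal_compute_offsets_py := by
  intro nb total _
  unfold Spec_compute_offsets_py compute_offsets_py compute_offsets_py_alt
  by_cases ht : total ≤ 0
  · rw [if_pos ht, if_pos ht]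
  · rw [if_neg ht, if_neg ht]
    have hm : (1 : Int) ≤ max 1 (total - 1) := le_max_left _ _
    have hA := pvALoop_eq (max 1 (total - 1)) nb.toNat 0
    have h0 : min (pvPrev 0) (max 1 (total - 1)) = 0 := by
      unfold pvPrev; rw [if_pos rfl]; omega
    rw [h0, Nat.zero_min] at hA
    dsimp only
    rw [hA, PySem.List.pyRange_one, List.map_map]
    simp only [Int.sub_zero]
    apply List.map_congr_left
    intro j _
    simp only [Function.comp_apply, zero_add]
    exact (pvB_point (max 1 (total - 1)) j).symm
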